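-- pv_equiv track=rewrite | github.com/husseinbarghout6-design/komodo-transcript | main.py | _build_chunk_ranges
-- ===== SOURCE A (Python) =====
-- from typing import List, Tuple, Dict, Any, Optional
--
-- def _build_chunk_ranges(segs: List[Dict[str, Any]], max_chars: int, max_segments: int) -> List[Tuple[int, int]]:
--     """
--     Greedy ranges that satisfy both constraints:
--       - total characters per chunk <= max_chars
--       - number of segments per chunk <= max_segments
--     Always make progress (at least 1 segment).
--     """
--     ranges: List[Tuple[int, int]] = []
--     n = len(segs)
--     i = 0
--     while i < n:
--         chars = 0
--         count = 0
--         j = i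
--         while j < n and count < max_segments:
--             next_len = len(segs[j].get("text", ""))
--             if count > 0 and chars + next_len > max_chars:
--                 break
--             chars += next_len
--             count += 1
--             j += 1
--         if j == i:  # extremely long single segment; force move by 1
--             j = i + 1
--         ranges.append((i, j - 1))
--         i = j
--     return ranges
-- ===== SOURCE B (Python) =====
-- from typing import List, Tuple, Dict, Any
--
-- def _build_chunk_ranges(segs: List[Dict[str, Any]], max_chars: int, max_segments: int) -> List[Tuple[int, int]]:
--     """Precompute prefix sums of segment lengths, then find each chunk's end by
--     binary search for the largest endpoint within both budgets (the chunk's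
--     first segment is always kept, so the search floor is i+1)."""
--     prefix = [0]
--     for seg in segs:
--         prefix.append(prefix[-1] + len(seg.get("text", "")))
--     n = len(segs)
--     ranges: List[Tuple[int, int]] = []
--     i = 0
--     while i < n:
--         lo = i + 1
--         hi = min(n, i + max_segments)
--         budget = prefix[i] + max_chars
--         while lo < hi:
--             mid = (lo + hi + 1) // 2
--             if prefix[mid] <= budget:
--                 lo = mid
--             else:
--                 hi = mid - 1
--         ranges.append((i, lo - 1))
--         i = lo
--     return ranges
-- ===== Notes on version B (the rewrite author's own statement) =====
-- stated objective: alternative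
-- what changed: Replaced A's nested greedy rescan with a precomputed prefix-sum array of segment text lengths and, per chunk, a binary search for the largest endpoint satisfying both the character budget and the segment cap (floor i+1, so the first segment is always kept).
import Mathlib
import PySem

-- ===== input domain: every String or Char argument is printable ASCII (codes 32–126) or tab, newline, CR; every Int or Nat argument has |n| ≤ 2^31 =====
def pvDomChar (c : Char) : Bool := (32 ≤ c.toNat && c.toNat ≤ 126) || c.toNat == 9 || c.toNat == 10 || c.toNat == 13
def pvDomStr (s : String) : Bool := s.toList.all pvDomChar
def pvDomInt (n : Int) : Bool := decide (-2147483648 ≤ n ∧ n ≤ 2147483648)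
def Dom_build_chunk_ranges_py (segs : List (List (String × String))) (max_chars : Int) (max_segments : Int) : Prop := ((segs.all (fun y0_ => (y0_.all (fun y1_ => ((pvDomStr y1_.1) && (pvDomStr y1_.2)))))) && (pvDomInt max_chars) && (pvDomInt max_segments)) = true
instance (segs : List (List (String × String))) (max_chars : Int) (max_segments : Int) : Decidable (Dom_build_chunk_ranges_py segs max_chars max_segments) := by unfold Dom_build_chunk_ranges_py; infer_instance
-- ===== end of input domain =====

-- B replaces A's nested greedy while-loops by a prefix-sum array plus a per-chunk binary search for the chunk end (objective: alternative algorithm).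


-- ===== PORT A =====
-- segs[j].get("text", "") : first-match lookup in the association list, default "" (shared by both ports)
def pvTextLen (seg : List (String × String)) : Int :=
  PySem.Str.len (((seg.find? (fun p => p.1 == "text")).map Prod.snd).getD "")

-- inner while loop of A: advances j while j < n ∧ count < max_segments, breaking when
-- count > 0 ∧ chars + next_len > max_chars; returns the final j.
-- fuel only makes the recursion structural; n - j steps always suffice.
def pvInnerA (segs : List (List (String × String))) (max_chars max_segments : Int)
    (n : Nat) : Nat → Nat → Int → Int → Nat
  | 0, j, _, _ => j
  | fuel + 1, j, chars, count =>
    if j < n ∧ count < max_segments then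
      let next_len := pvTextLen (segs.getD j [])
      if count > 0 ∧ chars + next_len > max_chars then j
      else pvInnerA segs max_chars max_segments n fuel (j + 1) (chars + next_len) (count + 1)
    else j

-- outer while loop of A; fuel = n suffices since i advances by at least 1 each iteration
def pvOuterA (segs : List (List (String × String))) (max_chars max_segments : Int)
    (n : Nat) : Nat → Nat → List (Int × Int)
  | 0, _ => []
  | fuel + 1, i =>
    if i < n then
      let j := pvInnerA segs max_chars max_segments n (n - i) i 0 0
      let j' := if j = i then i + 1 else j
      ((i : Int), (j' : Int) - 1) :: pvOuterA segs max_chars max_segments n fuel j'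
    else []

def build_chunk_ranges_py (segs : List (List (String × String))) (max_chars : Int) (max_segments : Int) : List (Int × Int) :=
  pvOuterA segs max_chars max_segments segs.length segs.length 0

-- ===== PORT B =====
-- prefix = [0]; for seg in segs: prefix.append(prefix[-1] + len(seg.get("text","")))
def pvPrefixList (segs : List (List (String × String))) : List Int :=
  segs.foldl (fun acc seg => acc ++ [acc.getLastD 0 + pvTextLen seg]) [0]

-- inner while loop of B (hand-written rightmost binary search); all indices stay
-- in range, so prefix[mid] never raises; fuel only makes the recursion structural.
def pvBS (pre : List Int) (budget : Int) : Nat → Int → Int → Int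
  | 0, lo, _ => lo
  | fuel + 1, lo, hi =>
    if lo < hi then
      let mid := PySem.Int.floordiv (lo + hi + 1) 2
      if PySem.List.pyGetD pre mid 0 ≤ budget then pvBS pre budget fuel mid hi
      else pvBS pre budget fuel lo (mid - 1)
    else lo

-- outer while loop of B; fuel = len(segs) suffices since i advances by at least 1
def pvOuterB (pre : List Int) (n : Int) (max_chars max_segments : Int) : Nat → Int → List (Int × Int)
  | 0, _ => []
  | fuel + 1, i =>
    if i < n then
      let hi := min n (i + max_segments)
      let budget := PySem.List.pyGetD pre i 0 + max_chars
      let lo := pvBS pre budget n.toNat (i + 1) hi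
      (i, lo - 1) :: pvOuterB pre n max_chars max_segments fuel lo
    else []

def build_chunk_ranges_py_alt (segs : List (List (String × String))) (max_chars : Int) (max_segments : Int) : List (Int × Int) :=
  pvOuterB (pvPrefixList segs) (segs.length : Int) max_chars max_segments segs.length 0

-- ===== PRECONDITION & SPEC =====
def Spec_build_chunk_ranges_py (segs : List (List (String × String))) (max_chars : Int) (max_segments : Int) (out : List (Int × Int)) : Prop := out = build_chunk_ranges_py_alt segs max_chars max_segments
instance (segs : List (List (String × String))) (max_chars : Int) (max_segments : Int) (out : List (Int × Int)) : Decidable (Spec_build_chunk_ranges_py segs max_chars max_segments out) := by unfold Spec_build_chunk_ranges_py; infer_instance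

-- ===== CLAIM (what is proved, stated in full; the proofs are below) =====
def Claim_equal_build_chunk_ranges_py : Prop := ∀ (segs : List (List (String × String))) (max_chars : Int) (max_segments : Int), Dom_build_chunk_ranges_py segs max_chars max_segments → Spec_build_chunk_ranges_py segs max_chars max_segments (build_chunk_ranges_py segs max_chars max_segments)

-- ===== LEMMAS AND PROOFS =====
-- math-level prefix sum: total text length of the first t segments
def pvP (segs : List (List (String × String))) (t : Int) : Int :=
  ((segs.take t.toNat).map pvTextLen).sum

theorem pvTextLen_nonneg (seg : List (String × String)) : 0 ≤ pvTextLen seg := by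
  simp [pvTextLen, PySem.Str.len_eq]

theorem pvP_mono (segs : List (List (String × String))) {s t : Int} (h : s ≤ t) :
    pvP segs s ≤ pvP segs t := by
  unfold pvP
  have h2 : s.toNat ≤ t.toNat := Int.toNat_le_toNat h
  have hsplit : segs.take t.toNat = segs.take s.toNat ++ (segs.drop s.toNat).take (t.toNat - s.toNat) := by
    rw [← List.take_add, Nat.add_sub_cancel' h2]
  rw [hsplit, List.map_append, List.sum_append]
  have hnn : 0 ≤ (((segs.drop s.toNat).take (t.toNat - s.toNat)).map pvTextLen).sum := by
    apply List.sum_nonneg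
    intro x hx
    rcases List.mem_map.mp hx with ⟨y, _, rfl⟩
    exact pvTextLen_nonneg y
  linarith

theorem pvP_succ (segs : List (List (String × String))) (j : Nat) (h : j < segs.length) :
    pvP segs ((j : Int) + 1) = pvP segs (j : Int) + pvTextLen (segs.getD j []) := by
  unfold pvP
  have h1 : ((j : Int) + 1).toNat = j + 1 := by omega
  have h2 : ((j : Int)).toNat = j := by omega
  rw [h1, h2, List.take_add_one, List.getElem?_eq_getElem h, List.map_append, List.sum_append,
    List.getD_eq_getElem segs [] h]
  simp

-- the list the B port builds, characterised
def pvScan (start : Int) : List (List (String × String)) → List Int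
  | [] => []
  | s :: r => (start + pvTextLen s) :: pvScan (start + pvTextLen s) r

theorem pvScan_foldl (l : List (List (String × String))) :
    ∀ acc : List Int,
      l.foldl (fun acc seg => acc ++ [acc.getLastD 0 + pvTextLen seg]) acc
        = acc ++ pvScan (acc.getLastD 0) l := by
  induction l with
  | nil => intro acc; simp [pvScan]
  | cons s r ih =>
    intro acc
    rw [List.foldl_cons, ih, List.getLastD_concat, pvScan, List.append_assoc, List.singleton_append]

theorem pvScan_length (start : Int) (l : List (List (String × String))) :
    (pvScan start l).length = l.length := by
  induction l generalizing start with
  | nil => rfl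
  | cons s r ih => simp [pvScan, ih]

theorem pvScan_get (l : List (List (String × String))) :
    ∀ (start : Int) (k : Nat), k < l.length →
      (pvScan start l)[k]? = some (start + ((l.take (k + 1)).map pvTextLen).sum) := by
  induction l with
  | nil => intro start k hk; simp at hk
  | cons s r ih =>
    intro start k hk
    cases k with
    | zero => simp [pvScan]
    | succ k =>
      have hk' : k < r.length := by simpa using hk
      rw [pvScan, List.getElem?_cons_succ, ih _ k hk']
      congr 1
      simp [List.take_succ_cons]
      ring

theorem pvPrefixList_eq (segs : List (List (String × String))) :
    pvPrefixList segs = 0 :: pvScan 0 segs := by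
  unfold pvPrefixList
  rw [pvScan_foldl]
  rfl

theorem pvPrefix_get (segs : List (List (String × String))) (t : Int)
    (h0 : 0 ≤ t) (h1 : t ≤ segs.length) :
    PySem.List.pyGetD (pvPrefixList segs) t 0 = pvP segs t := by
  have hlen : ((pvPrefixList segs).length : Int) = (segs.length : Int) + 1 := by
    rw [pvPrefixList_eq]; simp [pvScan_length]
  rw [PySem.List.pyGetD_eq_getElem _ _ h0 (by omega), List.getElem_eq_iff]
  rw [pvPrefixList_eq]
  rcases Nat.eq_zero_or_eq_succ_pred t.toNat with hz | hs
  · simp only [hz]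
    simp [pvP, hz]
  · rw [hs]
    have hk : t.toNat - 1 < segs.length := by omega
    have hpred : t.toNat.pred = t.toNat - 1 := rfl
    rw [List.getElem?_cons_succ, hpred, pvScan_get segs 0 (t.toNat - 1) hk]
    have h3 : t.toNat - 1 + 1 = t.toNat := by omega
    rw [h3, pvP]
    norm_num

-- rightmost-binary-search characterisation
theorem pvBS_char (pre : List Int) (budget : Int) :
    ∀ (fuel : Nat) (lo hi : Int), hi - lo < fuel → lo ≤ hi →
      (∀ s t : Int, lo ≤ s → s ≤ t → t ≤ hi →
        PySem.List.pyGetD pre t 0 ≤ budget → PySem.List.pyGetD pre s 0 ≤ budget) →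
      lo ≤ pvBS pre budget fuel lo hi ∧
      pvBS pre budget fuel lo hi ≤ hi ∧
      (pvBS pre budget fuel lo hi = lo ∨
        PySem.List.pyGetD pre (pvBS pre budget fuel lo hi) 0 ≤ budget) ∧
      (∀ t : Int, pvBS pre budget fuel lo hi < t → t ≤ hi →
        ¬ PySem.List.pyGetD pre t 0 ≤ budget) := by
  intro fuel
  induction fuel with
  | zero => intro lo hi hf hlh _; omega
  | succ f ih =>
    intro lo hi hf hlh hmono
    simp only [pvBS]
    by_cases hlt : lo < hi
    · rw [if_pos hlt]
      have hmb := PySem.Int.floordiv_two_mid_bounds (lo := lo + 1) (hi := hi) (by omega)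
      have heq : lo + 1 + hi = lo + hi + 1 := by ring
      rw [heq] at hmb
      set mid := PySem.Int.floordiv (lo + hi + 1) 2 with hmid
      by_cases hg : PySem.List.pyGetD pre mid 0 ≤ budget
      · rw [if_pos hg]
        have hrec := ih mid hi (by omega) (by omega)
          (fun s t hs hst hth => hmono s t (by omega) hst hth)
        refine ⟨by omega, hrec.2.1, ?_, hrec.2.2.2⟩
        rcases hrec.2.2.1 with h | h
        · right; rw [h]; exact hg
        · right; exact h
      · rw [if_neg hg]
        have hrec := ih lo (mid - 1) (by omega) (by omega)
          (fun s t hs hst hth => hmono s t hs hst (by omega))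
        refine ⟨hrec.1, by omega, hrec.2.2.1, ?_⟩
        intro t hrt hth hgt
        by_cases htm : t ≤ mid - 1
        · exact hrec.2.2.2 t hrt htm hgt
        · exact hg (hmono mid t (by omega) (by omega) hth hgt)
    · rw [if_neg hlt]
      exact ⟨le_refl lo, hlh, Or.inl rfl, fun t h1 h2 => by intro _; omega⟩

theorem pvBS_stop (pre : List Int) (budget : Int) (fuel : Nat) (lo hi : Int)
    (h : ¬ lo < hi) : pvBS pre budget (fuel + 1) lo hi = lo := by
  simp only [pvBS]
  rw [if_neg h]

-- A's inner-loop characterisation (state at j: chars = P j - P i, count = j - i)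
theorem pvInnerA_char (segs : List (List (String × String))) (max_chars max_segments : Int)
    (i : Nat) :
    ∀ (fuel j : Nat), i + 1 ≤ j → j ≤ segs.length →
      (j : Int) ≤ min (segs.length : Int) ((i : Int) + max_segments) →
      segs.length - j ≤ fuel →
      (j = i + 1 ∨ pvP segs (j : Int) ≤ pvP segs (i : Int) + max_chars) →
      i + 1 ≤ pvInnerA segs max_chars max_segments segs.length fuel j
          (pvP segs (j : Int) - pvP segs (i : Int)) ((j : Int) - (i : Int)) ∧
      ((pvInnerA segs max_chars max_segments segs.length fuel j
          (pvP segs (j : Int) - pvP segs (i : Int)) ((j : Int) - (i : Int)) : Int)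
        ≤ min (segs.length : Int) ((i : Int) + max_segments)) ∧
      (pvInnerA segs max_chars max_segments segs.length fuel j
          (pvP segs (j : Int) - pvP segs (i : Int)) ((j : Int) - (i : Int)) = i + 1 ∨
        pvP segs (pvInnerA segs max_chars max_segments segs.length fuel j
          (pvP segs (j : Int) - pvP segs (i : Int)) ((j : Int) - (i : Int)) : Int)
          ≤ pvP segs (i : Int) + max_chars) ∧
      (∀ t : Int, (pvInnerA segs max_chars max_segments segs.length fuel j
          (pvP segs (j : Int) - pvP segs (i : Int)) ((j : Int) - (i : Int)) : Int) < t →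
        t ≤ min (segs.length : Int) ((i : Int) + max_segments) →
        ¬ pvP segs t ≤ pvP segs (i : Int) + max_chars) := by
  intro fuel
  induction fuel with
  | zero =>
    intro j hj1 hj2 hHi hfuel hacc
    have hmin1 : min ((segs.length : Int)) ((i : Int) + max_segments) ≤ (segs.length : Int) :=
      min_le_left _ _
    simp only [pvInnerA]
    exact ⟨hj1, hHi, hacc, fun t h1 h2 => by intro _; omega⟩
  | succ f ih =>
    intro j hj1 hj2 hHi hfuel hacc
    have hmin1 : min ((segs.length : Int)) ((i : Int) + max_segments) ≤ (segs.length : Int) :=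
      min_le_left _ _
    have hmin2 : min ((segs.length : Int)) ((i : Int) + max_segments) ≤ (i : Int) + max_segments :=
      min_le_right _ _
    simp only [pvInnerA]
    split_ifs with hguard hbrk
    · -- break: the next segment does not fit
      obtain ⟨hg1, hg2⟩ := hguard
      have hstep := pvP_succ segs j hg1
      refine ⟨hj1, hHi, hacc, ?_⟩
      intro t ht1 ht2 hgt
      have hm : pvP segs ((j : Int) + 1) ≤ pvP segs t := pvP_mono segs (by omega)
      have := hbrk.2
      rw [List.getD_eq_getElem segs [] hg1] at this hstep
      linarith
    · -- continue
      obtain ⟨hg1, hg2⟩ := hguard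
      have hstep := pvP_succ segs j hg1
      have hcount : (0 : Int) < (j : Int) - (i : Int) := by omega
      have hfit : pvP segs ((j : Int)) - pvP segs ((i : Int)) + pvTextLen (segs.getD j []) ≤ max_chars := by
        by_contra hx
        exact hbrk ⟨hcount, by omega⟩
      have harg1 : pvP segs ((j : Int)) - pvP segs ((i : Int)) + pvTextLen (segs.getD j [])
          = pvP segs (((j + 1 : Nat)) : Int) - pvP segs ((i : Int)) := by
        push_cast
        linarith
      have harg2 : (j : Int) - (i : Int) + 1 = (((j + 1 : Nat)) : Int) - (i : Int) := by push_cast; ring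
      rw [harg1, harg2]
      refine ih (j + 1) (by omega) (by omega) ?_ (by omega) (Or.inr (by push_cast; linarith))
      rw [le_min_iff]
      constructor
      · push_cast; omega
      · push_cast; omega
    · -- guard false
      refine ⟨hj1, hHi, hacc, ?_⟩
      intro t ht1 ht2 _
      rcases not_and_or.mp hguard with hc | hc
      · have : (segs.length : Int) ≤ (j : Int) := by
          have := Nat.le_of_not_lt hc
          exact_mod_cast this
        omega
      · have : (i : Int) + max_segments ≤ (j : Int) := by omega
        omega

-- one unfolding step of A's inner loop (canonical fuel on the recursive call)
theorem pvInnerA_congr (segs : List (List (String × String))) (max_chars max_segments : Int)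
    (n : Nat) : ∀ (f₁ f₂ j : Nat) (ch c : Int), n ≤ f₁ + j → n ≤ f₂ + j →
    pvInnerA segs max_chars max_segments n f₁ j ch c
      = pvInnerA segs max_chars max_segments n f₂ j ch c := by
  intro f₁
  induction f₁ with
  | zero =>
    intro f₂ j ch c h1 h2
    cases f₂ with
    | zero => rfl
    | succ f =>
      simp only [pvInnerA]
      rw [if_neg (fun hh => absurd hh.1 (by omega))]
  | succ f ih =>
    intro f₂ j ch c h1 h2
    cases f₂ with
    | zero =>
      simp only [pvInnerA]
      rw [if_neg (fun hh => absurd hh.1 (by omega))]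
    | succ f₂ =>
      simp only [pvInnerA]
      split_ifs with hguard hbrk
      · rfl
      · exact ih f₂ (j + 1) (ch + pvTextLen (segs.getD j [])) (c + 1) (by omega) (by omega)
      · rfl

-- first iteration of A's inner loop from a fresh chunk (count = 0 never breaks)
theorem pvInnerA_head (segs : List (List (String × String))) (max_chars max_segments : Int)
    (n fuel i : Nat) (hin : i < n) (hms : 0 < max_segments) :
    pvInnerA segs max_chars max_segments n (fuel + 1) i 0 0
      = pvInnerA segs max_chars max_segments n fuel (i + 1)
          (0 + pvTextLen (segs.getD i [])) (0 + 1) := by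
  simp only [pvInnerA]
  rw [if_pos ⟨hin, hms⟩, if_neg (fun h => absurd h.1 (lt_irrefl 0))]

-- the key per-chunk agreement: B's binary search lands exactly on A's forced next index
theorem pvNext_eq (segs : List (List (String × String))) (max_chars max_segments : Int)
    (i : Nat) (hi : i < segs.length) :
    pvBS (pvPrefixList segs) (PySem.List.pyGetD (pvPrefixList segs) (i : Int) 0 + max_chars)
        ((segs.length : Int)).toNat ((i : Int) + 1)
        (min (segs.length : Int) ((i : Int) + max_segments))
      = ((if pvInnerA segs max_chars max_segments segs.length segs.length i 0 0 = i
          then i + 1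
          else pvInnerA segs max_chars max_segments segs.length segs.length i 0 0 : Nat) : Int) := by
  obtain ⟨f, hf⟩ : ∃ f, segs.length = f + 1 := ⟨segs.length - 1, by omega⟩
  have hi' : (i : Int) < (segs.length : Int) := by exact_mod_cast hi
  have htn : ((segs.length : Int)).toNat = segs.length := by simp
  have hbud : PySem.List.pyGetD (pvPrefixList segs) (i : Int) 0 = pvP segs (i : Int) :=
    pvPrefix_get segs (i : Int) (by positivity) (by omega)
  have hminl : min ((segs.length : Int)) ((i : Int) + max_segments) ≤ (segs.length : Int) :=
    min_le_left _ _
  have hminr : min ((segs.length : Int)) ((i : Int) + max_segments) ≤ (i : Int) + max_segments :=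
    min_le_right _ _
  rw [hbud, htn]
  by_cases hms : max_segments ≤ 0
  · -- empty budget of segments: A's inner loop never starts, B's search interval is empty
    have hA : pvInnerA segs max_chars max_segments segs.length segs.length i 0 0 = i := by
      conv_lhs => rw [hf]
      simp only [pvInnerA]
      rw [if_neg (fun h => absurd h.2 (by omega))]
    rw [hA, if_pos rfl, hf, pvBS_stop _ _ f _ _ (by intro h; rw [← hf] at *; linarith)]
    push_cast
    ring
  · -- at least the first segment is taken on both sides
    replace hms : 0 < max_segments := by omega
    have hstep := pvP_succ segs i hi
    have hAf : pvInnerA segs max_chars max_segments segs.length segs.length i 0 0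
        = pvInnerA segs max_chars max_segments segs.length (f + 1) i 0 0 :=
      pvInnerA_congr segs max_chars max_segments segs.length segs.length (f + 1) i 0 0
        (by omega) (by omega)
    have hc1 : 0 + pvTextLen (segs.getD i [])
        = pvP segs (((i + 1 : Nat)) : Int) - pvP segs ((i : Int)) := by
      push_cast
      linarith
    have hc2 : (0 : Int) + 1 = (((i + 1 : Nat)) : Int) - ((i : Int)) := by push_cast; ring
    have hA1 : pvInnerA segs max_chars max_segments segs.length segs.length i 0 0
        = pvInnerA segs max_chars max_segments segs.length f (i + 1)
            (pvP segs (((i + 1 : Nat)) : Int) - pvP segs ((i : Int)))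
            ((((i + 1 : Nat)) : Int) - ((i : Int))) := by
      rw [hAf, pvInnerA_head segs max_chars max_segments segs.length f i hi hms, hc1, hc2]
    have hHi1 : (((i + 1 : Nat)) : Int) ≤ min ((segs.length : Int)) ((i : Int) + max_segments) := by
      rw [le_min_iff]
      constructor
      · push_cast; omega
      · push_cast; omega
    have hchar := pvInnerA_char segs max_chars max_segments i f (i + 1) (le_refl _)
      (by omega) hHi1 (by omega) (Or.inl rfl)
    set r := pvInnerA segs max_chars max_segments segs.length f (i + 1)
      (pvP segs (((i + 1 : Nat)) : Int) - pvP segs ((i : Int)))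
      ((((i + 1 : Nat)) : Int) - ((i : Int))) with hrdef
    obtain ⟨ha1, ha2, ha3, ha4⟩ := hchar
    have hr1 : ((i + 1 : Nat) : Int) ≤ (r : Int) := by exact_mod_cast ha1
    rw [hA1, if_neg (by omega)]
    have hB := pvBS_char (pvPrefixList segs) (pvP segs ((i : Int)) + max_chars) segs.length
      ((i : Int) + 1) (min ((segs.length : Int)) ((i : Int) + max_segments))
      (by push_cast at hr1 ⊢; omega)
      (by rw [le_min_iff]; constructor <;> [omega; omega])
      (fun s t hs hst hth hgt => by
        rw [pvPrefix_get segs t (by linarith) (by linarith)] at hgt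
        rw [pvPrefix_get segs s (by linarith) (by linarith)]
        have := pvP_mono segs hst
        linarith)
    set rB := pvBS (pvPrefixList segs) (pvP segs ((i : Int)) + max_chars) segs.length
      ((i : Int) + 1) (min ((segs.length : Int)) ((i : Int) + max_segments)) with hrB
    obtain ⟨hb1, hb2, hb3, hb4⟩ := hB
    have hri : ((i + 1 : Nat) : Int) = (i : Int) + 1 := by push_cast; ring
    rcases lt_trichotomy rB ((r : Int)) with hlt | heq | hgt
    · exfalso
      rcases ha3 with hre | hgood
      · have : (r : Int) = ((i + 1 : Nat) : Int) := by exact_mod_cast hre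
        omega
      · have hz := hb4 ((r : Int)) hlt ha2
        rw [pvPrefix_get segs ((r : Int)) (by positivity) (by linarith)] at hz
        exact hz hgood
    · exact heq
    · exfalso
      rcases hb3 with hre | hgood
      · omega
      · rw [pvPrefix_get segs rB (by omega) (by linarith)] at hgood
        exact ha4 rB hgt hb2 hgood

theorem pvOuter_eq (segs : List (List (String × String))) (max_chars max_segments : Int) :
    ∀ (fuel i : Nat),
      pvOuterA segs max_chars max_segments segs.length fuel i
        = pvOuterB (pvPrefixList segs) (segs.length : Int) max_chars max_segments fuel (i : Int) := by
  intro fuel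
  induction fuel with
  | zero => intro i; rfl
  | succ f ih =>
    intro i
    simp only [pvOuterA, pvOuterB]
    by_cases hin : i < segs.length
    · have hin' : (i : Int) < (segs.length : Int) := by exact_mod_cast hin
      rw [if_pos hin, if_pos hin']
      have hinner : pvInnerA segs max_chars max_segments segs.length (segs.length - i) i 0 0
          = pvInnerA segs max_chars max_segments segs.length segs.length i 0 0 :=
        pvInnerA_congr segs max_chars max_segments segs.length (segs.length - i) segs.length i 0 0
          (by omega) (by omega)
      have hnext := pvNext_eq segs max_chars max_segments i hin
      rw [hinner, hnext, ih]
    · rw [if_neg hin, if_neg (by exact_mod_cast hin)]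

-- ===== VERDICT (by name: the statement is the Claim_ definition above) =====
theorem build_chunk_ranges_py_spec : Claim_equal_build_chunk_ranges_py := by
  intro segs max_chars max_segments _hdom
  unfold Spec_build_chunk_ranges_py build_chunk_ranges_py build_chunk_ranges_py_alt
  exact_mod_cast pvOuter_eq segs max_chars max_segments segs.length 0
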